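-- pv_equiv track=rewrite | github.com/SunoopDogg/Problem-Slove | BeakJoon/28300/28356.py | assign_exams
-- ===== SOURCE A (Python) =====
-- def assign_exams(M, N):
--     grid = [[0 for _ in range(M)] for _ in range(N)]
--
--     colors = [1, 2, 3, 4]
--
--     for i in range(N):
--         for j in range(M):
--             for color in colors:
--                 if (
--                     (i > 0 and grid[i - 1][j] == color) or
--                     (j > 0 and grid[i][j - 1] == color) or
--                     (i > 0 and j > 0 and grid[i - 1][j - 1] == color) or
--                     (i > 0 and j < M - 1 and grid[i - 1][j + 1] == color)
--                 ):
--                     continue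
--
--                 grid[i][j] = color
--                 break
--
--     return grid
-- ===== SOURCE B (Python) =====
-- def assign_exams(M, N):
--     # Closed-form fill: the greedy always produces the periodic 1,2/3,4 tiling;
--     # a single column (M == 1) just alternates 1,2.
--     if M == 1:
--         return [[1 + i % 2] for i in range(N)]
--     return [[1 + i % 2 * 2 + j % 2 for j in range(M)] for i in range(N)]
-- ===== Notes on version B (the rewrite author's own statement) =====
-- stated objective: faster
-- what changed: Replaced the triple-nested greedy neighbour-checking loop with a direct closed-form periodic fill (1,2/3,4 tiling, alternating 1,2 for a single column).
import Mathlib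
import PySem

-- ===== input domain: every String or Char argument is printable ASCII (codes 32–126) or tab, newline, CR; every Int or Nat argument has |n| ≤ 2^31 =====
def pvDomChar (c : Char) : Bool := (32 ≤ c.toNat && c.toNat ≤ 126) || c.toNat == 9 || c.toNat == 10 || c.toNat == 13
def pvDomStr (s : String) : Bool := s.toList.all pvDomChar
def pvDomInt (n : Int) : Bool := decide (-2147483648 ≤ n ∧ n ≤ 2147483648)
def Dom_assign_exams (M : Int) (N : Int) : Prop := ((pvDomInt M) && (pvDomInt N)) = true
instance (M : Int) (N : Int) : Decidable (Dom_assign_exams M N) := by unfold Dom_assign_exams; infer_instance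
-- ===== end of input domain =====

-- B replaces A's triple-nested greedy neighbour scan with a direct closed-form periodic fill (constant-factor faster).


-- ===== PORT A =====
-- grid[i][j] read; exact here: every read A performs is guarded, so its indices are in range
def pvCell (grid : List (List Int)) (i j : Int) : Int :=
  PySem.List.pyGetD (PySem.List.pyGetD grid i []) j 0

-- the (negated) 'continue' condition of A's colour loop
def pvOk (grid : List (List Int)) (M : Int) (i j c : Int) : Bool :=
  !((decide (0 < i) && (pvCell grid (i-1) j == c)) ||
    (decide (0 < j) && (pvCell grid i (j-1) == c)) ||
    (decide (0 < i) && decide (0 < j) && (pvCell grid (i-1) (j-1) == c)) ||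
    (decide (0 < i) && decide (j < M - 1) && (pvCell grid (i-1) (j+1) == c)))

-- the inner 'for j in range(M)' loop; 'for color … continue / break' is find? of the first ok
-- colour (none = leave the 0), and 'grid[i][j] = color' is pySetD (exact: i, j in range)
def pvInner (M : Int) (grid : List (List Int)) (i : Int) : List (List Int) :=
  (PySem.List.pyRange 0 M 1).foldl (fun g j =>
    match ([1, 2, 3, 4] : List Int).find? (fun c => pvOk g M i j c) with
    | some c => PySem.List.pySetD g i (PySem.List.pySetD (PySem.List.pyGetD g i []) j c)
    | none => g) grid

def assign_exams (M : Int) (N : Int) : List (List Int) :=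
  let grid := (PySem.List.pyRange 0 N 1).map (fun _ => (PySem.List.pyRange 0 M 1).map (fun _ => (0 : Int)))
  (PySem.List.pyRange 0 N 1).foldl (pvInner M) grid

-- ===== PORT B =====
def assign_exams_alt (M : Int) (N : Int) : List (List Int) :=
  if M = 1 then
    (PySem.List.pyRange 0 N 1).map (fun i => [1 + PySem.Int.mod i 2])
  else
    (PySem.List.pyRange 0 N 1).map (fun i =>
      (PySem.List.pyRange 0 M 1).map (fun j =>
        1 + PySem.Int.mod i 2 * 2 + PySem.Int.mod j 2))

-- ===== PRECONDITION & SPEC =====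
def Spec_assign_exams (M : Int) (N : Int) (out : List (List Int)) : Prop := out = assign_exams_alt M N
instance (M : Int) (N : Int) (out : List (List Int)) : Decidable (Spec_assign_exams M N out) := by unfold Spec_assign_exams; infer_instance

-- ===== CLAIM (what is proved, stated in full; the proofs are below) =====
def Claim_equal_assign_exams : Prop := ∀ (M : Int) (N : Int), Dom_assign_exams M N → Spec_assign_exams M N (assign_exams M N)

-- ===== LEMMAS AND PROOFS =====

-- the colour the tiling puts at cell (i, j) of an N×m grid
def tval (m i j : Nat) : Int :=
  if m = 1 then (if i % 2 = 0 then 1 else 2)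
  else if i % 2 = 0 then (if j % 2 = 0 then 1 else 2)
  else (if j % 2 = 0 then 3 else 4)

def pfx (m i j : Nat) : List Int := (List.range j).map (fun k => tval m i k)

def tRow (m i : Nat) : List Int := pfx m i m

def tGrid (m n : Nat) : List (List Int) := (List.range n).map (fun i => tRow m i)

theorem natMod2 (k : Nat) : PySem.Int.mod (k : Int) 2 = ((k % 2 : Nat) : Int) := by
  rw [PySem.Int.mod_eq_emod_of_pos (by norm_num)]
  omega

theorem pfx_getD (m i j k : Nat) (hk : k < j) : (pfx m i j).getD k 0 = tval m i k := by
  simp [pfx, List.getD, List.getElem?_map, List.getElem?_range hk]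

theorem getD_append_len {α : Type} (P : List α) (mid : α) (rest : List α) (d : α) :
    (P ++ mid :: rest).getD P.length d = mid := by
  simp [List.getD]

theorem getD_append_lt {α : Type} (P t : List α) (k : Nat) (hk : k < P.length) (d : α) :
    (P ++ t).getD k d = P.getD k d := by
  simp [List.getD, List.getElem?_append_left hk]

-- the greedy colour loop picks exactly the tiling's colour, given the neighbour values
theorem pick (m i j : Nat) (hj : j < m) (g : List (List Int))
    (hup : 0 < i → pvCell g ((i:Int)-1) (j:Int) = tval m (i-1) j)
    (hleft : 0 < j → pvCell g (i:Int) ((j:Int)-1) = tval m i (j-1))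
    (hul : 0 < i → 0 < j → pvCell g ((i:Int)-1) ((j:Int)-1) = tval m (i-1) (j-1))
    (hur : 0 < i → j + 1 < m → pvCell g ((i:Int)-1) ((j:Int)+1) = tval m (i-1) (j+1)) :
    ([1, 2, 3, 4] : List Int).find? (fun c => pvOk g (m:Int) (i:Int) (j:Int) c) = some (tval m i j) := by
  have gi : decide ((0:Int) < (i:Int)) = decide (0 < i) := by simp
  have gj : decide ((0:Int) < (j:Int)) = decide (0 < j) := by simp
  have gr : decide ((j:Int) < (m:Int) - 1) = decide (j + 1 < m) := by
    simp only [decide_eq_decide]; omega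
  simp only [pvOk, gi, gj, gr, List.find?]
  rcases Nat.eq_zero_or_pos i with hi | hi
  · subst hi
    rcases Nat.eq_zero_or_pos j with hjz | hjz
    · subst hjz; simp [tval]
    · have hm1 : m ≠ 1 := by omega
      rcases Nat.mod_two_eq_zero_or_one j with hp | hp
      · have hp' : (j - 1) % 2 = 1 := by omega
        rw [hleft hjz]; simp [tval, hjz, hm1, hp, hp']
      · have hp' : (j - 1) % 2 = 0 := by omega
        rw [hleft hjz]; simp [tval, hjz, hm1, hp, hp']
  · rcases eq_or_ne m 1 with hm1 | hm1
    · have hjz : j = 0 := by omega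
      subst hjz hm1
      rcases Nat.mod_two_eq_zero_or_one i with hp | hp
      · have hp' : (i - 1) % 2 = 1 := by omega
        rw [hup hi]; simp [tval, hi, hp, hp']
      · have hp' : (i - 1) % 2 = 0 := by omega
        rw [hup hi]; simp [tval, hi, hp, hp']
    · rw [hup hi]
      have hp' : (i - 1) % 2 = 1 - i % 2 := by omega
      rcases Nat.eq_zero_or_pos j with hjz | hjz
      · have hje : j + 1 < m := by omega
        have h2m : 1 < m := by omega
        rw [hur hi hje]
        rcases Nat.mod_two_eq_zero_or_one i with hp | hp <;>
          simp [tval, hi, hjz, hm1, hp, hp', h2m]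
      · rw [hul hi hjz, hleft hjz]
        have hq' : (j - 1) % 2 = 1 - j % 2 := by omega
        rcases Nat.lt_or_ge (j+1) m with hje | hje
        · rw [hur hi hje]
          have hq'' : (j + 1) % 2 = 1 - j % 2 := by omega
          rcases Nat.mod_two_eq_zero_or_one i with hp | hp <;>
            rcases Nat.mod_two_eq_zero_or_one j with hq | hq <;>
            simp [tval, hi, hjz, hm1, hp, hp', hq, hq', hq'']
        · rcases Nat.mod_two_eq_zero_or_one i with hp | hp <;>
            rcases Nat.mod_two_eq_zero_or_one j with hq | hq <;>
            simp [tval, hi, hjz, hm1, hp, hp', hq, hq', Nat.not_lt.mpr hje]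

-- one row of the greedy fills left to right with the tiling's colours
theorem inner_loop (m i : Nat) (P rest : List (List Int)) (hP : P.length = i)
    (hPrev : 0 < i → P.getD (i-1) [] = tRow m (i-1)) (j : Nat) (hjm : j ≤ m) :
    (PySem.List.pyRange 0 (j:Int) 1).foldl (fun g j =>
        match ([1, 2, 3, 4] : List Int).find? (fun c => pvOk g (m:Int) (i:Int) j c) with
        | some c => PySem.List.pySetD g (i:Int) (PySem.List.pySetD (PySem.List.pyGetD g (i:Int) []) j c)
        | none => g)
      (P ++ (List.replicate m (0:Int)) :: rest)
    = P ++ (pfx m i j ++ List.replicate (m-j) (0:Int)) :: rest := by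
  induction j with
  | zero => simp [pfx, PySem.List.pyRange_one_eq_nil]
  | succ j ih =>
    have hjm' : j ≤ m := by omega
    have hcast : ((j+1 : Nat) : Int) = (j:Int) + 1 := by push_cast; ring
    rw [hcast, PySem.List.pyRange_one_succ_right (by positivity), List.foldl_append, ih hjm']
    set g := P ++ (pfx m i j ++ List.replicate (m-j) (0:Int)) :: rest with hg
    have hmidlen : (pfx m i j).length = j := by simp [pfx]
    -- cell reads on g
    have hrowi : PySem.List.pyGetD g (i:Int) [] = pfx m i j ++ List.replicate (m-j) 0 := by
      rw [PySem.List.pyGetD_natCast, hg, ← hP, getD_append_len]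
    have hcelli : ∀ k : Nat, k < j → pvCell g (i:Int) (k:Int) = tval m i k := by
      intro k hk
      rw [pvCell, hrowi, PySem.List.pyGetD_natCast,
        getD_append_lt _ _ k (by omega), pfx_getD m i j k hk]
    have hrowprev : 0 < i → PySem.List.pyGetD g ((i:Int)-1) [] = tRow m (i-1) := by
      intro hi
      have : ((i:Int) - 1) = ((i-1 : Nat) : Int) := by omega
      rw [this, PySem.List.pyGetD_natCast, hg, getD_append_lt _ _ _ (by omega), hPrev hi]
    have hcellprev : ∀ k : Nat, 0 < i → k < m → pvCell g ((i:Int)-1) (k:Int) = tval m (i-1) k := by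
      intro k hi hk
      rw [pvCell, hrowprev hi, PySem.List.pyGetD_natCast, tRow, pfx_getD m (i-1) m k hk]
    have hfind := pick m i j (by omega) g
      (fun hi => hcellprev j hi (by omega))
      (fun hj => by
        have : ((j:Int) - 1) = ((j-1 : Nat) : Int) := by omega
        rw [this, hcelli (j-1) (by omega)])
      (fun hi hj => by
        have : ((j:Int) - 1) = ((j-1 : Nat) : Int) := by omega
        rw [this, hcellprev (j-1) hi (by omega)])
      (fun hi hj => by
        have : ((j:Int) + 1) = ((j+1 : Nat) : Int) := by omega
        rw [this, hcellprev (j+1) hi (by omega)])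
    simp only [List.foldl_cons, List.foldl_nil, hfind, hrowi]
    -- the write
    have hrep : List.replicate (m-j) (0:Int) = 0 :: List.replicate (m-j-1) 0 := by
      rw [← List.replicate_succ]; congr 1; omega
    have hset : (pfx m i j ++ List.replicate (m-j) (0:Int)).set j (tval m i j)
        = pfx m i (j+1) ++ List.replicate (m-(j+1)) 0 := by
      rw [hrep, List.set_append_right _ _ (by omega : (pfx m i j).length ≤ j), hmidlen,
        Nat.sub_self, List.set_cons_zero]
      simp [pfx, List.range_succ, Nat.sub_sub]
    rw [PySem.List.pySetD_natCast, PySem.List.pySetD_natCast, hset, hg, ← hP,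
      List.set_append_right _ _ (Nat.le_refl _), Nat.sub_self, List.set_cons_zero]

-- the row-by-row fold builds the tiling top to bottom
theorem outer_loop (m : Nat) : ∀ (n r : Nat),
    (PySem.List.pyRange 0 (n:Int) 1).foldl (pvInner (m:Int))
      (List.replicate (n+r) (List.replicate m (0:Int)))
    = tGrid m n ++ List.replicate r (List.replicate m (0:Int)) := by
  intro n
  induction n with
  | zero => intro r; simp [tGrid, PySem.List.pyRange_one_eq_nil]
  | succ n ih =>
    intro r
    have hcast : ((n+1 : Nat) : Int) = (n:Int) + 1 := by push_cast; ring
    have hrr : n + 1 + r = n + (r+1) := by omega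
    rw [hcast, PySem.List.pyRange_one_succ_right (by positivity), List.foldl_append, hrr, ih (r+1)]
    simp only [List.foldl_cons, List.foldl_nil]
    have hrep : List.replicate (r+1) (List.replicate m (0:Int))
        = List.replicate m (0:Int) :: List.replicate r (List.replicate m 0) := List.replicate_succ
    rw [hrep]
    have hP : (tGrid m n).length = n := by simp [tGrid]
    have hPrev : 0 < n → (tGrid m n).getD (n-1) [] = tRow m (n-1) := by
      intro hn
      simp [tGrid, List.getD, List.getElem?_map, List.getElem?_range (show n-1 < n by omega)]
    rw [pvInner, show PySem.List.pyRange 0 (m:Int) 1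
        = PySem.List.pyRange 0 ((m:Nat):Int) 1 from rfl]
    rw [inner_loop m n (tGrid m n) (List.replicate r (List.replicate m 0)) hP hPrev m (Nat.le_refl m)]
    simp [tGrid, List.range_succ, tRow]

theorem pyConstMap {a : Type} (K : Int) (x : a) :
    (PySem.List.pyRange 0 K 1).map (fun _ => x) = List.replicate K.toNat x := by
  rw [List.eq_replicate_iff]
  constructor
  · simp [PySem.List.length_pyRange_one]
  · simp

theorem pyRange_toNat (N : Int) : PySem.List.pyRange 0 N 1 = PySem.List.pyRange 0 ((N.toNat : Nat) : Int) 1 := by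
  rcases (show 0 ≤ N ∨ N < 0 by omega) with h | h
  · rw [Int.toNat_of_nonneg h]
  · rw [PySem.List.pyRange_one_eq_nil (by omega), PySem.List.pyRange_one_eq_nil (by omega)]

theorem a_eq_tGrid (M N : Int) : assign_exams M N = tGrid M.toNat N.toNat := by
  unfold assign_exams
  simp only [pyConstMap]
  rcases (show 0 ≤ M ∨ M < 0 by omega) with hM | hM
  · obtain ⟨m, rfl⟩ : ∃ m : Nat, M = (m:Int) := ⟨M.toNat, by omega⟩
    rw [Int.toNat_natCast, pyRange_toNat N]
    have h := outer_loop m N.toNat 0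
    simp only [Nat.add_zero, List.replicate_zero, List.append_nil] at h
    exact h
  · have hMn : PySem.List.pyRange 0 M 1 = [] := PySem.List.pyRange_one_eq_nil (by omega)
    have hM0 : M.toNat = 0 := by omega
    have hfix : ∀ (l : List Int) (g : List (List Int)), l.foldl (pvInner M) g = g := by
      intro l
      induction l with
      | nil => intro g; rfl
      | cons x xs ih => intro g; rw [List.foldl_cons, pvInner, hMn, List.foldl_nil, ih]
    rw [hfix, hM0]
    rw [show tGrid 0 N.toNat = List.replicate N.toNat [] from by
      simp [tGrid, tRow, pfx]]
    simp

theorem alt_eq_tGrid (M N : Int) : assign_exams_alt M N = tGrid M.toNat N.toNat := by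
  unfold assign_exams_alt
  rcases eq_or_ne M 1 with hM1 | hM1
  · subst hM1
    rw [if_pos rfl, PySem.List.pyRange_one]
    simp only [Int.sub_zero, List.map_map]
    apply List.map_congr_left
    intro k _
    simp only [Function.comp, Int.zero_add, natMod2]
    rcases Nat.mod_two_eq_zero_or_one k with hp | hp <;>
      simp [tRow, pfx, tval, hp, List.range_succ]
  · rw [if_neg hM1]
    have hm1 : M.toNat ≠ 1 := by omega
    have hrow : ∀ k : Nat, (PySem.List.pyRange 0 M 1).map
        (fun j => 1 + PySem.Int.mod ((k:Nat):Int) 2 * 2 + PySem.Int.mod j 2) = tRow M.toNat k := by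
      intro k
      rw [pyRange_toNat M, PySem.List.pyRange_one, tRow, pfx]
      simp only [Int.sub_zero, List.map_map, Int.toNat_natCast]
      apply List.map_congr_left
      intro j _
      simp only [Function.comp, Int.zero_add, natMod2]
      rcases Nat.mod_two_eq_zero_or_one k with hp | hp <;>
        rcases Nat.mod_two_eq_zero_or_one j with hq | hq <;>
        simp [tval, hm1, hp, hq]
    rw [pyRange_toNat N, PySem.List.pyRange_one 0 ((N.toNat : Nat) : Int), tGrid]
    simp only [Int.sub_zero, List.map_map, Int.toNat_natCast]
    apply List.map_congr_left
    intro k _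
    simp only [Function.comp, Int.zero_add]
    exact hrow k

-- ===== VERDICT (by name: the statement is the Claim_ definition above) =====
theorem assign_exams_spec : Claim_equal_assign_exams := by
  intro M N _
  unfold Spec_assign_exams
  rw [a_eq_tGrid, alt_eq_tGrid]
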